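-- pv_equiv track=rewrite | github.com/Fawazk/Python-problems | leetcode-problems/Array/leetcode.com-problems-number-of-rectangles-that-can-form-the-largest-square.py | countGoodRectangles
-- ===== SOURCE A (Python) =====
-- from typing import List
--
-- def countGoodRectangles(rectangles: List[List[int]]) -> int:
--     temp = {}
--     for i in range(len(rectangles)):
--         if rectangles[i][0] < rectangles[i][1]:
--             if rectangles[i][0] in temp:
--                 temp[rectangles[i][0]] += 1
--             else:
--                 temp[rectangles[i][0]] = 1
--         else:
--             if rectangles[i][1] in temp:
--                 temp[rectangles[i][1]] += 1
--             else:
--                 temp[rectangles[i][1]] = 1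
--     maxvalue = max(temp)
--     return temp[maxvalue]
--
-- rectangles = [[5,8],[3,9],[5,12],[16,5]]
-- ===== SOURCE B (Python) =====
-- from typing import List
--
-- def countGoodRectangles(rectangles: List[List[int]]) -> int:
--     best = None
--     count = 0
--     for r in rectangles:
--         s = r[0] if r[0] < r[1] else r[1]
--         if best is None or s > best:
--             best, count = s, 1
--         elif s == best:
--             count += 1
--     return count
-- ===== Notes on version B (the rewrite author's own statement) =====
-- stated objective: simpler
-- what changed: Replaces the side->count frequency dict plus max-over-keys lookup by a single pass that maintains only the running best square side and its count, resetting the count whenever a larger side appears.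
import Mathlib
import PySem

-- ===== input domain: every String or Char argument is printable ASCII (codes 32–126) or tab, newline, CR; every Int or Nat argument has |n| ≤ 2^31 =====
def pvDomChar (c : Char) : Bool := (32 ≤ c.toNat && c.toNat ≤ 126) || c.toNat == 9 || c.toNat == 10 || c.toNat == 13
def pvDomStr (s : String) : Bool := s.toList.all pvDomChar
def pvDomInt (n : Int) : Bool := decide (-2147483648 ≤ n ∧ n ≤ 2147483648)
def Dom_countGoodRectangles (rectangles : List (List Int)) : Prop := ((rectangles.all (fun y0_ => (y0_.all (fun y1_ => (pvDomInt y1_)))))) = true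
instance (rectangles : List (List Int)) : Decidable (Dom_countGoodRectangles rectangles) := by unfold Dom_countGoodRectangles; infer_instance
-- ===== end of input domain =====

-- B replaces A's side->count dict and max-over-keys lookup by one pass that keeps only
-- the running best square side and its count (reset on a larger side) — simpler, same O(n).

-- ===== PORT A =====
def countGoodRectangles (rectangles : List (List Int)) : Int :=
  let temp : PySem.Dict Int Int :=
    (PySem.List.pyRange 0 (PySem.List.len rectangles)).foldl
      (fun (temp : PySem.Dict Int Int) i =>
        if PySem.List.pyGetD (PySem.List.pyGetD rectangles i []) 0 0 <
           PySem.List.pyGetD (PySem.List.pyGetD rectangles i []) 1 0 then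
          if temp.contains (PySem.List.pyGetD (PySem.List.pyGetD rectangles i []) 0 0) then
            temp.insert (PySem.List.pyGetD (PySem.List.pyGetD rectangles i []) 0 0)
              (temp.getD (PySem.List.pyGetD (PySem.List.pyGetD rectangles i []) 0 0) 0 + 1)
          else
            temp.insert (PySem.List.pyGetD (PySem.List.pyGetD rectangles i []) 0 0) 1
        else
          if temp.contains (PySem.List.pyGetD (PySem.List.pyGetD rectangles i []) 1 0) then
            temp.insert (PySem.List.pyGetD (PySem.List.pyGetD rectangles i []) 1 0)
              (temp.getD (PySem.List.pyGetD (PySem.List.pyGetD rectangles i []) 1 0) 0 + 1)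
          else
            temp.insert (PySem.List.pyGetD (PySem.List.pyGetD rectangles i []) 1 0) 1)
      PySem.Dict.empty
  match PySem.List.max? temp.keys (fun x => x) with
  | some maxvalue => temp.getD maxvalue 0
  | none => 0    -- unreachable inside Pre_: Python's max({}) raises ValueError

-- ===== PORT B =====
def countGoodRectangles_alt (rectangles : List (List Int)) : Int :=
  (rectangles.foldl
    (fun (acc : Option Int × Int) r =>
      let s := if PySem.List.pyGetD r 0 0 < PySem.List.pyGetD r 1 0
               then PySem.List.pyGetD r 0 0 else PySem.List.pyGetD r 1 0
      match acc with
      | (none, _) => (some s, 1)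
      | (some best, count) =>
          if best < s then (some s, 1)
          else if s = best then (some best, count + 1)
          else (some best, count))
    (none, 0)).2

-- ===== PRECONDITION & SPEC =====
-- A raises ValueError on an empty list (max of an empty dict) and IndexError when some
-- rectangle has fewer than 2 entries; exactly those inputs are excluded.
def Pre_countGoodRectangles (rectangles : List (List Int)) : Prop :=
  rectangles ≠ [] ∧ ∀ r ∈ rectangles, 2 ≤ r.length
instance (rectangles : List (List Int)) : Decidable (Pre_countGoodRectangles rectangles) := by
  unfold Pre_countGoodRectangles; infer_instance
def pvWitness_countGoodRectangles : List (List Int) := [[5, 8], [3, 9], [5, 12], [16, 5]]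

def Spec_countGoodRectangles (rectangles : List (List Int)) (out : Int) : Prop := out = countGoodRectangles_alt rectangles
instance (rectangles : List (List Int)) (out : Int) : Decidable (Spec_countGoodRectangles rectangles out) := by unfold Spec_countGoodRectangles; infer_instance

-- ===== CLAIM (what is proved, stated in full; the proofs are below) =====
def Claim_equal_countGoodRectangles : Prop := ∀ (rectangles : List (List Int)), Dom_countGoodRectangles rectangles → Pre_countGoodRectangles rectangles → Spec_countGoodRectangles rectangles (countGoodRectangles rectangles)

-- ===== LEMMAS AND PROOFS =====

-- the min side of a rectangle, as both ports compute it
def pvSide (r : List Int) : Int := min (PySem.List.pyGetD r 0 0) (PySem.List.pyGetD r 1 0)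

-- B's loop body, named for the lemmas (definitionally the lambda in the port)
def pvStepB (acc : Option Int × Int) (s : Int) : Option Int × Int :=
  match acc with
  | (none, _) => (some s, 1)
  | (some best, count) =>
      if best < s then (some s, 1)
      else if s = best then (some best, count + 1)
      else (some best, count)

-- A's loop body is a counting insert at the min side
lemma pvStepA (temp : PySem.Dict Int Int) (r : List Int) :
    (if PySem.List.pyGetD r 0 0 < PySem.List.pyGetD r 1 0 then
      if temp.contains (PySem.List.pyGetD r 0 0) then
        temp.insert (PySem.List.pyGetD r 0 0) (temp.getD (PySem.List.pyGetD r 0 0) 0 + 1)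
      else temp.insert (PySem.List.pyGetD r 0 0) 1
    else
      if temp.contains (PySem.List.pyGetD r 1 0) then
        temp.insert (PySem.List.pyGetD r 1 0) (temp.getD (PySem.List.pyGetD r 1 0) 0 + 1)
      else temp.insert (PySem.List.pyGetD r 1 0) 1)
    = temp.insert (pvSide r) (temp.getD (pvSide r) 0 + 1) := by
  unfold pvSide
  rcases lt_or_ge (PySem.List.pyGetD r 0 0) (PySem.List.pyGetD r 1 0) with h | h
  · rw [if_pos h, min_eq_left (le_of_lt h)]
    rcases hc : temp.contains (PySem.List.pyGetD r 0 0) with _ | _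
    · simp [PySem.Dict.getD_of_not_contains _ _ hc]
    · simp
  · rw [if_neg (not_lt.mpr h), min_eq_right h]
    rcases hc : temp.contains (PySem.List.pyGetD r 1 0) with _ | _
    · simp [PySem.Dict.getD_of_not_contains _ _ hc]
    · simp

-- two nonempty lists with the same elements have the same identity-max
lemma pvMaxSame (xs ys : List Int) (hxs : xs ≠ []) (hys : ys ≠ [])
    (h : ∀ a : Int, a ∈ xs ↔ a ∈ ys) :
    PySem.List.max? xs (fun x => x) = PySem.List.max? ys (fun x => x) := by
  rcases hx : PySem.List.max? xs (fun x => x) with _ | m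
  · exact absurd ((PySem.List.max?_eq_none_iff xs _).mp hx) hxs
  rcases hy : PySem.List.max? ys (fun x => x) with _ | m'
  · exact absurd ((PySem.List.max?_eq_none_iff ys _).mp hy) hys
  have h1 : m ≤ m' := PySem.List.max?_isMax hy m ((h m).mp (PySem.List.max?_mem hx))
  have h2 : m' ≤ m := PySem.List.max?_isMax hx m' ((h m').mpr (PySem.List.max?_mem hy))
  rw [le_antisymm h1 h2]

-- A's index loop equals the counting fold over the min-sides
lemma pvFoldA (rectangles : List (List Int)) :
    (PySem.List.pyRange 0 (PySem.List.len rectangles)).foldl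
      (fun (temp : PySem.Dict Int Int) i =>
        if PySem.List.pyGetD (PySem.List.pyGetD rectangles i []) 0 0 <
           PySem.List.pyGetD (PySem.List.pyGetD rectangles i []) 1 0 then
          if temp.contains (PySem.List.pyGetD (PySem.List.pyGetD rectangles i []) 0 0) then
            temp.insert (PySem.List.pyGetD (PySem.List.pyGetD rectangles i []) 0 0)
              (temp.getD (PySem.List.pyGetD (PySem.List.pyGetD rectangles i []) 0 0) 0 + 1)
          else
            temp.insert (PySem.List.pyGetD (PySem.List.pyGetD rectangles i []) 0 0) 1
        else
          if temp.contains (PySem.List.pyGetD (PySem.List.pyGetD rectangles i []) 1 0) then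
            temp.insert (PySem.List.pyGetD (PySem.List.pyGetD rectangles i []) 1 0)
              (temp.getD (PySem.List.pyGetD (PySem.List.pyGetD rectangles i []) 1 0) 0 + 1)
          else
            temp.insert (PySem.List.pyGetD (PySem.List.pyGetD rectangles i []) 1 0) 1)
      PySem.Dict.empty
    = (rectangles.map pvSide).foldl
        (fun (temp : PySem.Dict Int Int) k => temp.insert k (temp.getD k 0 + 1)) PySem.Dict.empty := by
  refine (PySem.List.foldl_pyRange_pyGetD rectangles []
    (fun (temp : PySem.Dict Int Int) (r : List Int) =>
      if PySem.List.pyGetD r 0 0 < PySem.List.pyGetD r 1 0 then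
        if temp.contains (PySem.List.pyGetD r 0 0) then
          temp.insert (PySem.List.pyGetD r 0 0) (temp.getD (PySem.List.pyGetD r 0 0) 0 + 1)
        else temp.insert (PySem.List.pyGetD r 0 0) 1
      else
        if temp.contains (PySem.List.pyGetD r 1 0) then
          temp.insert (PySem.List.pyGetD r 1 0) (temp.getD (PySem.List.pyGetD r 1 0) 0 + 1)
        else temp.insert (PySem.List.pyGetD r 1 0) 1)
    PySem.Dict.empty (le_refl 0)).trans ?_
  simp only [Int.toNat_zero, List.drop_zero]
  rw [List.foldl_map]
  apply PySem.List.foldl_congr_mem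
  intro temp r _
  exact pvStepA temp r

-- keys of the counting fold are the distinct min-sides
lemma pvKeysA (sides : List Int) :
    ((sides.foldl (fun (temp : PySem.Dict Int Int) k => temp.insert k (temp.getD k 0 + 1))
      PySem.Dict.empty).keys) = PySem.Set.ofList sides := by
  have h := PySem.Dict.keys_foldl_insert sides
    (fun (d : PySem.Dict Int Int) k => d.getD k 0 + 1) PySem.Dict.empty
  rw [h, PySem.Set.ofList_eq_foldl]
  rfl

-- B's fold from a known best/count state computes the running max and its count
lemma pvFoldB (sides : List Int) (b c : Int) :
    sides.foldl pvStepB (some b, c) =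
      (some (sides.foldl max b),
       (if sides.foldl max b = b then c else 0) + sides.count (sides.foldl max b)) := by
  induction sides generalizing b c with
  | nil => simp
  | cons s rest ih =>
    have hmem := PySem.List.le_foldl_max rest
    simp only [List.foldl_cons, pvStepB]
    by_cases h1 : b < s
    · rw [if_pos h1, ih]
      simp only [max_eq_right (le_of_lt h1)]
      have hs : s ≤ rest.foldl max s := (hmem s).1
      have hnb : rest.foldl max s ≠ b := by omega
      rw [if_neg hnb, List.count_cons]
      by_cases h2 : rest.foldl max s = s <;> simp [h2, beq_iff_eq] <;> omega
    · rw [if_neg h1]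
      have hbs : max b s = b := max_eq_left (by omega)
      by_cases h2 : s = b
      · rw [if_pos h2, ih]
        simp only [hbs]
        rw [h2, List.count_cons]
        by_cases h3 : rest.foldl max b = b <;> simp [h3, beq_iff_eq] <;> omega
      · rw [if_neg h2, ih]
        simp only [hbs]
        rw [List.count_cons]
        by_cases h3 : rest.foldl max b = s
        · have hb : b ≤ rest.foldl max b := (PySem.List.le_foldl_max rest b).1
          omega
        · simp [beq_iff_eq, Ne.symm h3]

-- ===== VERDICT (by name: the statement is the Claim_ definition above) =====
theorem countGoodRectangles_spec : Claim_equal_countGoodRectangles := by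
  intro rectangles _ hpre
  obtain ⟨hne, _⟩ := hpre
  unfold Spec_countGoodRectangles countGoodRectangles countGoodRectangles_alt
  simp only []
  rw [pvFoldA]
  have hmap : (fun (acc : Option Int × Int) (r : List Int) =>
      let s := if PySem.List.pyGetD r 0 0 < PySem.List.pyGetD r 1 0
               then PySem.List.pyGetD r 0 0 else PySem.List.pyGetD r 1 0
      match acc with
      | (none, _) => (some s, 1)
      | (some best, count) =>
          if best < s then (some s, 1)
          else if s = best then (some best, count + 1)
          else (some best, count)) = fun acc r => pvStepB acc (pvSide r) := by
    funext acc r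
    have hs : (if PySem.List.pyGetD r 0 0 < PySem.List.pyGetD r 1 0
               then PySem.List.pyGetD r 0 0 else PySem.List.pyGetD r 1 0) = pvSide r := by
      unfold pvSide
      rcases lt_or_ge (PySem.List.pyGetD r 0 0) (PySem.List.pyGetD r 1 0) with h | h
      · rw [if_pos h, min_eq_left (le_of_lt h)]
      · rw [if_neg (not_lt.mpr h), min_eq_right h]
    simp only [hs]
    rfl
  rw [hmap, ← List.foldl_map]
  set sides := rectangles.map pvSide with hsides
  have hsne : sides ≠ [] := by simpa [hsides] using hne
  have hkne : PySem.Set.ofList sides ≠ [] := by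
    intro hnil
    rcases List.exists_mem_of_ne_nil sides hsne with ⟨a, ha⟩
    have : a ∈ PySem.Set.ofList sides := (PySem.Set.mem_ofList sides a).mpr ha
    simp [hnil] at this
  rw [pvKeysA, pvMaxSame _ _ hkne hsne (fun a => PySem.Set.mem_ofList sides a)]
  obtain ⟨s0, rest, hcons⟩ := List.exists_cons_of_ne_nil hsne
  rw [hcons]
  rw [PySem.List.max?_id_cons, List.foldl_cons]
  show _ = ((rest.foldl pvStepB (pvStepB (none, 0) s0)).2)
  have : pvStepB (none, 0) s0 = (some s0, 1) := rfl
  rw [this, pvFoldB]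
  simp only [PySem.Dict.getD_foldl_insert_add_one]
  have hs0 : s0 ≤ rest.foldl max s0 := (PySem.List.le_foldl_max rest s0).1
  by_cases h : rest.foldl max s0 = s0 <;>
    simp [h, PySem.Dict.getD_insert, PySem.Dict.getD_empty]
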